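-- pv_equiv track=rewrite | github.com/ntsoftware/aoc2021 | day25/part1.py | update_h
-- ===== SOURCE A (Python) =====
-- def update_h(s):
--     w = len(s[0])
--     h = len(s)
--     t = [[''] * w for _ in range(h)]
--     for y in range(h):
--         for x in range(w):
--             a, b, c = s[y][(x-1)%w], s[y][x], s[y][(x+1)%w]
--             if a == '>' and b == '.':
--                 t[y][x] = '>'
--             elif b == '>' and c == '.':
--                 t[y][x] = '.'
--             else:
--                 t[y][x] = b
--     return t
-- ===== SOURCE B (Python) =====
-- def update_h(s):
--     w = len(s[0])
--     out = []
--     for row in s: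
--         new = row[:w]
--         movers = [x for x in range(w) if row[x] == '>' and row[(x + 1) % w] == '.']
--         for x in movers:
--             new[x] = '.'
--             new[(x + 1) % w] = '>'
--         out.append(new)
--     return out
-- ===== Notes on version B (the rewrite author's own statement) =====
-- stated objective: alternative
-- what changed: B replaces A's per-cell three-neighbour reconstruction of every cell with a gather-then-apply decomposition: per row it copies the first len(s[0]) cells with a slice, collects the list of mover positions (x with row[x]=='>' and row[(x+1)%w]=='.') in one pass, and then performs only the sparse in-place '.'/'>' writes for each collected mover, leaving non-moving cells untouched.
import Mathlib
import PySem

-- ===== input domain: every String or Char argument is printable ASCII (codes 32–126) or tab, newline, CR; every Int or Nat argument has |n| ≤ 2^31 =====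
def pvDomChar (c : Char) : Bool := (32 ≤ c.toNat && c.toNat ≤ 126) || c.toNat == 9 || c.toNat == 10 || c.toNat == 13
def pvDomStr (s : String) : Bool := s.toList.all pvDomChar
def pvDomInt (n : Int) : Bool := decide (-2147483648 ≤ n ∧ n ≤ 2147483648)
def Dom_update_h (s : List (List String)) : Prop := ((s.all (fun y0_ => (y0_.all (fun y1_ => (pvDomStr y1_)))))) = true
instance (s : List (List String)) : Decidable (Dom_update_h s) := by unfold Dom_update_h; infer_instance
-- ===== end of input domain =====

-- B replaces A's per-cell three-neighbour reconstruction by a gather-then-apply decomposition: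
-- per row, copy the first w cells, collect the mover positions, then perform only the sparse
-- '.'/'>' writes for each mover (objective: alternative).

-- ===== PORT A =====
def update_h (s : List (List String)) : List (List String) :=
  let w : Nat := (PySem.List.pyGetD s 0 []).length
  let h : Nat := s.length
  let t0 : List (List String) := (PySem.List.pyRange 0 (h : Int) 1).map (fun _ => List.replicate w "")
  (PySem.List.pyRange 0 (h : Int) 1).foldl (fun t y =>
    (PySem.List.pyRange 0 (w : Int) 1).foldl (fun t x =>
      let row := PySem.List.pyGetD s y []
      let a := PySem.List.pyGetD row (PySem.Int.mod (x - 1) (w : Int)) ""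
      let b := PySem.List.pyGetD row x ""
      let c := PySem.List.pyGetD row (PySem.Int.mod (x + 1) (w : Int)) ""
      let v : String := if a = ">" ∧ b = "." then ">" else if b = ">" ∧ c = "." then "." else b
      PySem.List.pySetD t y (PySem.List.pySetD (PySem.List.pyGetD t y []) x v)) t) t0

-- ===== PORT B =====
def update_h_alt (s : List (List String)) : List (List String) :=
  let w : Nat := (PySem.List.pyGetD s 0 []).length
  s.foldl (fun out row =>
    let new := PySem.List.slice row none (some (w : Int))
    let movers := (PySem.List.pyRange 0 (w : Int) 1).filter (fun x =>
      (PySem.List.pyGetD row x "" == ">") && (PySem.List.pyGetD row (PySem.Int.mod (x + 1) (w : Int)) "" == "."))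
    let new2 := movers.foldl (fun t x =>
      PySem.List.pySetD (PySem.List.pySetD t x ".") (PySem.Int.mod (x + 1) (w : Int)) ">") new
    out ++ [new2]) []

-- ===== PRECONDITION & SPEC =====
-- Pre_ is exactly A's domain: it excludes the empty grid (A's s[0] raises IndexError) and grids
-- with a row shorter than the first row (A's row indexing raises IndexError there).
def Pre_update_h (s : List (List String)) : Prop :=
  s ≠ [] ∧ ∀ r ∈ s, (s.headD []).length ≤ r.length
instance (s : List (List String)) : Decidable (Pre_update_h s) := by unfold Pre_update_h; infer_instance
def pvWitness_update_h : List (List String) := [[">", ".", "."], [".", ".", ">"]]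
def Spec_update_h (s : List (List String)) (out : List (List String)) : Prop := out = update_h_alt s
instance (s : List (List String)) (out : List (List String)) : Decidable (Spec_update_h s out) := by unfold Spec_update_h; infer_instance

-- ===== CLAIM (what is proved, stated in full; the proofs are below) =====
def Claim_equal_update_h : Prop := ∀ (s : List (List String)), Dom_update_h s → Pre_update_h s → Spec_update_h s (update_h s)

-- ===== LEMMAS AND PROOFS =====

-- A's per-cell value at (y, x) (Int indices, as in the port of A)
def pvV (s : List (List String)) (w : Nat) (y x : Int) : String :=
  let row := PySem.List.pyGetD s y []
  let a := PySem.List.pyGetD row (PySem.Int.mod (x - 1) (w : Int)) ""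
  let b := PySem.List.pyGetD row x ""
  let c := PySem.List.pyGetD row (PySem.Int.mod (x + 1) (w : Int)) ""
  if a = ">" ∧ b = "." then ">" else if b = ">" ∧ c = "." then "." else b

-- the same per-cell value over the truncated row, Nat indices
def pvCellFun (row : List String) (k : Nat) : String :=
  let w := row.length
  let a := row.getD ((k + w - 1) % w) ""
  let b := row.getD k ""
  let c := row.getD ((k + 1) % w) ""
  if a = ">" ∧ b = "." then ">" else if b = ">" ∧ c = "." then "." else b

-- B's Nat-level mover predicate and write step
def pvMoverP (r : List String) (w : Nat) (x : Nat) : Bool :=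
  (r.getD x "" == ">") && (r.getD ((x + 1) % w) "" == ".")

def pvStep (w : Nat) (t : List String) (x : Nat) : List String :=
  (t.set x ".").set ((x + 1) % w) ">"

-- ---------- A-side lemmas ----------

lemma pv_foldl_set {α : Type} (G : Nat → α) :
    ∀ (n : Nat) (t : List α), n ≤ t.length →
      (List.range n).foldl (fun t k => t.set k (G k)) t = (List.range n).map G ++ t.drop n := by
  intro n
  induction n with
  | zero => intro t _; simp
  | succ m ih =>
    intro t ht
    rw [List.range_succ, List.foldl_append, List.foldl_cons, List.foldl_nil,
        ih t (by omega)]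
    have hm : m < t.length := by omega
    rw [List.set_append]
    simp only [List.length_map, List.length_range, lt_irrefl, Nat.sub_self]
    rw [if_false, List.drop_eq_getElem_cons hm, List.set_cons_zero]
    simp [List.map_append]

lemma pv_row_local (v : Nat → String) :
    ∀ (l : List Nat) (t : List (List String)) (y : Nat), y < t.length →
      l.foldl (fun t (x : Nat) => PySem.List.pySetD t (y : Int)
          (PySem.List.pySetD (PySem.List.pyGetD t (y : Int) []) ((x : Nat) : Int) (v x))) t
        = PySem.List.pySetD t (y : Int)
            (l.foldl (fun r (x : Nat) => PySem.List.pySetD r ((x : Nat) : Int) (v x))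
              (PySem.List.pyGetD t (y : Int) [])) := by
  intro l
  induction l with
  | nil =>
    intro t y hy
    simp only [List.foldl_nil, PySem.List.pySetD_natCast, PySem.List.pyGetD_natCast]
    rw [List.getD_eq_getElem t [] hy, List.set_getElem_self]
  | cons x l ih =>
    intro t y hy
    simp only [List.foldl_cons]
    rw [ih _ y (by simpa using hy)]
    simp only [PySem.List.pySetD_natCast, PySem.List.pyGetD_natCast]
    rw [List.set_set]
    congr 1
    congr 1
    rw [List.getD_eq_getElem _ [] (by simpa using hy),
        List.getElem_set_self, List.getD_eq_getElem t [] hy]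

lemma pv_inner_eval (V : Nat → String) (w : Nat) (r : List String) (hr : r.length = w) :
    (List.range w).foldl (fun r (k : Nat) => PySem.List.pySetD r (k : Int) (V k)) r
      = (List.range w).map V := by
  simp only [PySem.List.pySetD_natCast]
  rw [pv_foldl_set V w r (by omega)]
  simp [hr]

lemma pv_outer (w : Nat) (Row : Nat → List String) (hR : ∀ y, (Row y).length = w)
    (F : List (List String) → Nat → List (List String))
    (hF : ∀ (t : List (List String)) (y : Nat), y < t.length → (∀ r ∈ t, r.length = w) →
      F t y = t.set y (Row y)) :
    ∀ (n : Nat) (t : List (List String)), n ≤ t.length → (∀ r ∈ t, r.length = w) →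
      (List.range n).foldl F t = (List.range n).map Row ++ t.drop n := by
  intro n
  induction n with
  | zero => intro t _ _; simp
  | succ m ih =>
    intro t ht hrows
    rw [List.range_succ, List.foldl_append, List.foldl_cons, List.foldl_nil,
        ih t (by omega) hrows]
    have hm : m < t.length := by omega
    have hlen : (List.map Row (List.range m) ++ List.drop m t).length = t.length := by
      simp; omega
    have hrows' : ∀ r ∈ List.map Row (List.range m) ++ List.drop m t, r.length = w := by
      intro r hr
      rcases List.mem_append.1 hr with h | h
      · obtain ⟨y, _, rfl⟩ := List.mem_map.1 h
        exact hR y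
      · exact hrows r (List.mem_of_mem_drop h)
    rw [hF _ m (by omega) hrows']
    rw [List.set_append]
    simp only [List.length_map, List.length_range, lt_irrefl, Nat.sub_self]
    rw [if_false, List.drop_eq_getElem_cons hm, List.set_cons_zero]
    simp [List.map_append]

lemma pv_cell_eq (s : List (List String)) (w y k : Nat)
    (hrow : w ≤ (s.getD y []).length) (hk : k < w) :
    pvV s w (y : Int) (k : Int) = pvCellFun ((s.getD y []).take w) k := by
  have hw' : (0 : Int) < (w : Int) := by exact_mod_cast Nat.pos_of_ne_zero (by omega)
  have e1 : PySem.Int.mod ((k : Int) - 1) (w : Int) = (((k + w - 1) % w : Nat) : Int) := by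
    rw [PySem.Int.mod_eq_emod_of_pos hw',
        show ((k : Int) - 1) = ((k + w - 1 : Nat) : Int) - (w : Int) by omega,
        Int.sub_emod_right, ← Int.natCast_mod]
  have e2 : PySem.Int.mod ((k : Int) + 1) (w : Int) = ((((k + 1) % w : Nat)) : Int) := by
    rw [PySem.Int.mod_eq_emod_of_pos hw',
        show ((k : Int) + 1) = ((k + 1 : Nat) : Int) by omega,
        ← Int.natCast_mod]
  have hlen : ((s.getD y []).take w).length = w := by rw [List.length_take]; omega
  have hget : ∀ (m : Nat), m < w →
      (s.getD y []).getD m "" = ((s.getD y []).take w).getD m "" := by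
    intro m hm
    rw [List.getD_eq_getElem _ "" (by omega),
        List.getD_eq_getElem _ "" (by rw [hlen]; exact hm), List.getElem_take]
  simp only [pvV, pvCellFun, e1, e2, PySem.List.pyGetD_natCast, hlen]
  rw [hget _ (Nat.mod_lt _ (by omega)), hget _ hk, hget _ (Nat.mod_lt _ (by omega))]

-- A equals the rowwise map of pvV
lemma pv_A_eq (s : List (List String)) (hne : s ≠ [])
    (hrect : ∀ r ∈ s, (s.headD []).length ≤ r.length) :
    update_h s = (List.range s.length).map (fun (y : Nat) =>
      (List.range (s.headD []).length).map (fun (k : Nat) =>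
        pvV s (s.headD []).length ((y : Nat) : Int) ((k : Nat) : Int))) := by
  simp only [update_h]
  have hw0 : (PySem.List.pyGetD s 0 []).length = (s.headD []).length := by
    rw [PySem.List.pyGetD_zero]
    cases s with
    | nil => rfl
    | cons a l => rfl
  set w : Nat := (s.headD []).length with hwdef
  rw [hw0]
  simp only [PySem.List.pyRange_one, zero_add, Int.sub_zero, Int.toNat_natCast, List.map_map,
    List.foldl_map, Function.comp_def]
  rw [pv_outer w (fun y => (List.range w).map (fun k => pvV s w (y : Int) (k : Nat)))
        (by intro y; simp)
        _ ?hF s.length _ (by simp) ?rows]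
  case rows =>
    intro r hr
    simp only [List.mem_map] at hr
    obtain ⟨_, _, rfl⟩ := hr
    simp
  case hF =>
    intro t y hy hrows
    beta_reduce
    rw [pv_row_local _ _ t y hy]
    have hget : PySem.List.pyGetD t (y : Int) [] = t[y] := by
      rw [PySem.List.pyGetD_natCast, List.getD_eq_getElem t [] hy]
    rw [hget, pv_inner_eval _ w t[y] (hrows _ (List.getElem_mem hy))]
    simp only [PySem.List.pySetD_natCast, pvV]
  · have hdrop : (List.map (fun _ => List.replicate w "") (List.range s.length)).drop s.length
        = [] := by
      apply List.drop_eq_nil_of_le; simp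
    rw [hdrop, List.append_nil]

-- ---------- B-side lemmas ----------

lemma pv_succ_pred (w k : Nat) (hw : 0 < w) (hk : k < w) :
    ((k + w - 1) % w + 1) % w = k := by
  rw [Nat.mod_add_mod, show k + w - 1 + 1 = k + w by omega, Nat.add_mod_right,
      Nat.mod_eq_of_lt hk]

lemma pv_pred_succ (w m : Nat) (hw : 0 < w) (hm : m < w) :
    ((m + 1) % w + w - 1) % w = m := by
  rw [show (m + 1) % w + w - 1 = (m + 1) % w + (w - 1) by omega, Nat.mod_add_mod,
      show m + 1 + (w - 1) = m + w by omega, Nat.add_mod_right, Nat.mod_eq_of_lt hm]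

lemma pv_length_foldl_step (w : Nat) :
    ∀ (l : List Nat) (t : List String), (l.foldl (pvStep w) t).length = t.length := by
  intro l
  induction l with
  | nil => intro t; rfl
  | cons x l ih => intro t; rw [List.foldl_cons, ih]; simp [pvStep]

-- applying the sparse mover writes yields A's per-cell rule, pointwise
lemma pv_apply (w : Nat) (r : List String) (hr : r.length = w) :
    ∀ (l : List Nat),
      (∀ x ∈ l, x < w ∧ r.getD x "" = ">" ∧ r.getD ((x + 1) % w) "" = ".") →
      ∀ (k : Nat), k < w →
      (l.foldl (pvStep w) r).getD k ""
        = if k ∈ l then "." else if (k + w - 1) % w ∈ l then ">" else r.getD k "" := by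
  intro l
  induction l using List.reverseRecOn with
  | nil => intro _ k hk; simp
  | append_singleton l' m ih =>
    intro hl k hk
    have hm := hl m (by simp)
    have hw : 0 < w := by omega
    have hl' : ∀ x ∈ l', x < w ∧ r.getD x "" = ">" ∧ r.getD ((x + 1) % w) "" = "." := by
      intro x hx; exact hl x (by simp [hx])
    have hne : (m + 1) % w ≠ m := by
      intro h
      rw [h] at hm
      exact absurd (hm.2.1.symm.trans hm.2.2) (by decide)
    have hT : (l'.foldl (pvStep w) r).length = w := by rw [pv_length_foldl_step, hr]
    rw [List.foldl_append, List.foldl_cons, List.foldl_nil]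
    have hlen1 : ((l'.foldl (pvStep w) r).set m ".").length = w := by simp [hT]
    have hgoalLen : k < (((l'.foldl (pvStep w) r).set m ".").set ((m + 1) % w) ">").length := by
      simp [hlen1]; omega
    rw [pvStep, List.getD_eq_getElem _ "" hgoalLen]
    simp only [List.getElem_set]
    by_cases hk1 : k = (m + 1) % w
    · rw [if_pos hk1.symm]
      have hkl : k ∉ l' := by
        intro hx
        have h2 := (hl' k hx).2.1
        rw [hk1] at h2
        exact absurd (h2.symm.trans hm.2.2) (by decide)
      have hpred : (k + w - 1) % w = m := by rw [hk1]; exact pv_pred_succ w m hw hm.1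
      rw [if_neg (by simp only [List.mem_append, List.mem_singleton, not_or]; exact ⟨hk1 ▸ hkl, hk1 ▸ hne⟩), if_pos (by simp [hpred])]
    · rw [if_neg (fun h => hk1 h.symm)]
      by_cases hk2 : k = m
      · rw [if_pos hk2.symm, if_pos (by simp [hk2])]
      · rw [if_neg (fun h => hk2 h.symm),
            ← List.getD_eq_getElem _ "" (by rw [hT]; exact hk),
            ih hl' k hk]
        have hmem1 : (k ∈ l' ++ [m]) ↔ k ∈ l' := by simp [hk2]
        have hmem2 : ((k + w - 1) % w ∈ l' ++ [m]) ↔ (k + w - 1) % w ∈ l' := by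
          simp only [List.mem_append, List.mem_singleton, or_iff_left_iff_imp]
          intro h
          exact absurd (by rw [← h, pv_succ_pred w k hw hk]) hk1
        simp only [hmem1, hmem2]

-- the result of B's sparse writes, cell by cell, is A's per-cell rule
lemma pv_cells_eq (w : Nat) (r : List String) (hr : r.length = w) (k : Nat) (hk : k < w) :
    (if k ∈ (List.range w).filter (pvMoverP r w) then "."
     else if (k + w - 1) % w ∈ (List.range w).filter (pvMoverP r w) then ">"
     else r.getD k "") = pvCellFun r k := by
  have hw : 0 < w := by omega
  have hmem : ∀ x : Nat, x < w →
      ((x ∈ (List.range w).filter (pvMoverP r w)) ↔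
        (r.getD x "" = ">" ∧ r.getD ((x + 1) % w) "" = ".")) := by
    intro x hx
    rw [List.mem_filter, List.mem_range]
    simp [pvMoverP, hx]
  have hpredlt : (k + w - 1) % w < w := Nat.mod_lt _ hw
  simp only [pvCellFun, hr]
  by_cases h1 : r.getD k "" = ">" ∧ r.getD ((k + 1) % w) "" = "."
  · rw [if_pos ((hmem k hk).2 h1)]
    rw [if_neg (by rw [h1.1]; exact fun h => absurd h.2 (by decide)),
        if_pos h1]
  · rw [if_neg (fun h => h1 ((hmem k hk).1 h))]
    by_cases h2 : r.getD ((k + w - 1) % w) "" = ">" ∧ r.getD k "" = "."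
    · rw [if_pos ((hmem _ hpredlt).2 ⟨h2.1, by rw [pv_succ_pred w k hw hk]; exact h2.2⟩),
          if_pos h2]
    · rw [if_neg (fun h => by
          have := (hmem _ hpredlt).1 h
          rw [pv_succ_pred w k hw hk] at this
          exact h2 this),
          if_neg h2, if_neg h1]

-- B's row computation equals the rowwise map of pvCellFun
lemma pv_B_row_eq (w : Nat) (row : List String) (hw : w ≤ row.length) :
    ((PySem.List.pyRange 0 (w : Int) 1).filter (fun x =>
        (PySem.List.pyGetD row x "" == ">") &&
        (PySem.List.pyGetD row (PySem.Int.mod (x + 1) (w : Int)) "" == "."))).foldl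
      (fun t x => PySem.List.pySetD (PySem.List.pySetD t x ".") (PySem.Int.mod (x + 1) (w : Int)) ">")
      (PySem.List.slice row none (some (w : Int)))
    = (List.range w).map (pvCellFun (row.take w)) := by
  have hr : (row.take w).length = w := by rw [List.length_take]; omega
  have hget : ∀ (m : Nat), m < w → row.getD m "" = (row.take w).getD m "" := by
    intro m hm
    rw [List.getD_eq_getElem _ "" (by omega),
        List.getD_eq_getElem _ "" (by rw [hr]; exact hm), List.getElem_take]
  have emod : ∀ x : Nat, x < w →
      PySem.Int.mod ((x : Int) + 1) (w : Int) = ((((x + 1) % w : Nat)) : Int) := by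
    intro x hx
    have hw' : (0 : Int) < (w : Int) := by exact_mod_cast Nat.pos_of_ne_zero (by omega)
    rw [PySem.Int.mod_eq_emod_of_pos hw',
        show ((x : Int) + 1) = ((x + 1 : Nat) : Int) by omega, ← Int.natCast_mod]
  rw [PySem.List.slice_to_natCast, PySem.List.pyRange_one]
  simp only [Int.sub_zero, Int.toNat_natCast, zero_add]
  rw [List.filter_map, List.foldl_map]
  rw [List.filter_congr (q := fun x => pvMoverP (row.take w) w x)
        (by intro x hx
            have hxw : x < w := List.mem_range.1 hx
            simp only [Function.comp, PySem.List.pyGetD_natCast, emod x hxw, pvMoverP,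
              hget x hxw, hget _ (Nat.mod_lt _ (by omega))])]
  have hstep := PySem.List.foldl_congr_mem
      (l := List.filter (fun x => pvMoverP (List.take w row) w x) (List.range w))
      (init := List.take w row)
      (f := fun t (x : Nat) => PySem.List.pySetD (PySem.List.pySetD t ((x : Nat) : Int) ".")
              (PySem.Int.mod (((x : Nat) : Int) + 1) (w : Int)) ">")
      (g := pvStep w)
      (by intro acc x hx
          have hxw : x < w := List.mem_range.1 (List.mem_of_mem_filter hx)
          simp only [PySem.List.pySetD_natCast, emod x hxw, pvStep])
  rw [hstep]
  have hlen : ((List.filter (pvMoverP (row.take w) w) (List.range w)).foldl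
      (pvStep w) (row.take w)).length = w := by rw [pv_length_foldl_step, hr]
  apply List.ext_getElem
  · simp [hlen]
  · intro k hk1 hk2
    have hkw : k < w := by rw [hlen] at hk1; exact hk1
    rw [← List.getD_eq_getElem _ "" hk1,
        pv_apply w (row.take w) hr _
          (by intro x hx
              have hxw : x < w := List.mem_range.1 (List.mem_of_mem_filter hx)
              have := List.of_mem_filter hx
              simp only [pvMoverP, Bool.and_eq_true, beq_iff_eq] at this
              exact ⟨hxw, this.1, this.2⟩)
          k hkw]
    rw [pv_cells_eq w (row.take w) hr k hkw]
    simp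

lemma pv_foldl_append {α β : Type} (f : α → β) :
    ∀ (l : List α) (acc : List β),
      l.foldl (fun out row => out ++ [f row]) acc = acc ++ l.map f := by
  intro l
  induction l with
  | nil => intro acc; simp
  | cons x l ih => intro acc; rw [List.foldl_cons, ih]; simp

theorem pv_main (s : List (List String)) (hne : s ≠ [])
    (hrect : ∀ r ∈ s, (s.headD []).length ≤ r.length) :
    update_h s = update_h_alt s := by
  have hw0 : (PySem.List.pyGetD s 0 []).length = (s.headD []).length := by
    rw [PySem.List.pyGetD_zero]
    cases s with
    | nil => rfl
    | cons a l => rfl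
  set w : Nat := (s.headD []).length with hwdef
  rw [pv_A_eq s hne hrect]
  simp only [update_h_alt, hw0]
  rw [pv_foldl_append, List.nil_append]
  rw [List.map_congr_left
        (fun (row : List String) (hrow : row ∈ s) => pv_B_row_eq w row (hrect row hrow))]
  apply List.ext_getElem
  · simp
  · intro y hy1 hy2
    have hy : y < s.length := by simpa using hy1
    simp only [List.getElem_map, List.getElem_range]
    apply List.map_congr_left
    intro k hk
    have hkw : k < w := List.mem_range.1 hk
    have := pv_cell_eq s w y k
        (by rw [List.getD_eq_getElem s [] hy]; exact hrect _ (List.getElem_mem hy)) hkw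
    rw [List.getD_eq_getElem s [] hy] at this
    exact this

-- ===== VERDICT (by name: the statement is the Claim_ definition above) =====
theorem update_h_spec : Claim_equal_update_h := by
  intro s _ hpre
  unfold Spec_update_h
  exact pv_main s hpre.1 hpre.2
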